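-- pv_equiv track=rewrite | github.com/10cirenehc/NU_cs337_project1 | zafir_bonus/bonus/zafir_bonus.py | remove_actor_names
-- ===== SOURCE A (Python) =====
-- def remove_actor_names(list_to_modify, actors_list):
--     names_to_remove = []
--     for sublist in actors_list:
--         for _, name in sublist:
--             if len(name.split())==2:
--                 first_name, last_name = name.split()
--                 names_to_remove.extend([first_name.lower(), last_name.lower(), name.lower().replace(" ", "")])
--             elif len(name.split())==1:
--                 first_name = name.split()[0]
--                 names_to_remove.extend([first_name.lower()])
--
--     list_to_modify = [string for string in list_to_modify
--                       if string.lower() not in names_to_remove]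
--
--     return list_to_modify
-- ===== SOURCE B (Python) =====
-- def remove_actor_names(list_to_modify, actors_list):
--     def matches(low, name):
--         parts = name.split()
--         if len(parts) == 2:
--             return (low == parts[0].lower() or low == parts[1].lower()
--                     or low == name.lower().replace(" ", ""))
--         if len(parts) == 1:
--             return low == parts[0].lower()
--         return False
--     return [s for s in list_to_modify
--             if not any(matches(s.lower(), name)
--                        for sublist in actors_list for _, name in sublist)]
-- ===== Notes on version B (the rewrite author's own statement) =====
-- stated objective: alternative
-- what changed: B builds no names_to_remove table: it filters each string by scanning the actor names directly, computing each name's token forms inline and stopping at the first match, instead of materialising the full token list first and testing membership in it.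
import Mathlib
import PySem

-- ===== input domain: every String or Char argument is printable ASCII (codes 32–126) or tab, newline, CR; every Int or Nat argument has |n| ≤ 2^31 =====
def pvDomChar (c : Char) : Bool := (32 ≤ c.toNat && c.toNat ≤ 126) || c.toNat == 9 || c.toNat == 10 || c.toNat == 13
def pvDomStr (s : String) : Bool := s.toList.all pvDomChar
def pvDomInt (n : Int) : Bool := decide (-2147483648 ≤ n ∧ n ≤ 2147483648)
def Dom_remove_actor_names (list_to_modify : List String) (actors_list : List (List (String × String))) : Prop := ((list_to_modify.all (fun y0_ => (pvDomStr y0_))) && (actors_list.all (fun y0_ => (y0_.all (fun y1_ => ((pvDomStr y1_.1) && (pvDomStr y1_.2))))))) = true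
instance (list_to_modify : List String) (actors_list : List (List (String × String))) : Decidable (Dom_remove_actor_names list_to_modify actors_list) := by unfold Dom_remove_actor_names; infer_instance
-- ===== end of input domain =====

-- B filters each string by scanning the actor names directly with an inline token check and
-- early exit, instead of first materialising the full names_to_remove token list (alternative).

-- ===== PORT A =====
-- inner loop body of A: extend names_to_remove with the tokens of one (_, name) pair
def pvAStep (acc : List String) (p : String × String) : List String :=
  if (PySem.Str.split₀ p.2).length == 2 then
    acc ++ [PySem.Str.lower (PySem.Str.split₀ p.2)[0]!,
            PySem.Str.lower (PySem.Str.split₀ p.2)[1]!,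
            PySem.Str.replace (PySem.Str.lower p.2) " " ""]
  else if (PySem.Str.split₀ p.2).length == 1 then
    acc ++ [PySem.Str.lower (PySem.Str.split₀ p.2)[0]!]
  else acc

def remove_actor_names (list_to_modify : List String) (actors_list : List (List (String × String))) : List String :=
  let names_to_remove : List String :=
    actors_list.foldl (fun acc sublist => sublist.foldl pvAStep acc) []
  list_to_modify.filter (fun s => !(names_to_remove.contains (PySem.Str.lower s)))

-- ===== PORT B =====
-- does string (already lowercased) match one actor name's token forms?
def pvMatches (low : String) (name : String) : Bool :=
  if (PySem.Str.split₀ name).length == 2 then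
    low == PySem.Str.lower (PySem.Str.split₀ name)[0]! || low == PySem.Str.lower (PySem.Str.split₀ name)[1]!
      || low == PySem.Str.replace (PySem.Str.lower name) " " ""
  else if (PySem.Str.split₀ name).length == 1 then
    low == PySem.Str.lower (PySem.Str.split₀ name)[0]!
  else false

def remove_actor_names_alt (list_to_modify : List String) (actors_list : List (List (String × String))) : List String :=
  list_to_modify.filter (fun s =>
    !(actors_list.any (fun sublist => sublist.any (fun p => pvMatches (PySem.Str.lower s) p.2))))

-- ===== PRECONDITION & SPEC =====
def Spec_remove_actor_names (list_to_modify : List String) (actors_list : List (List (String × String))) (out : List String) : Prop := out = remove_actor_names_alt list_to_modify actors_list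
instance (list_to_modify : List String) (actors_list : List (List (String × String))) (out : List String) : Decidable (Spec_remove_actor_names list_to_modify actors_list out) := by unfold Spec_remove_actor_names; infer_instance

-- ===== CLAIM (what is proved, stated in full; the proofs are below) =====
def Claim_equal_remove_actor_names : Prop := ∀ (list_to_modify : List String) (actors_list : List (List (String × String))), Dom_remove_actor_names list_to_modify actors_list → Spec_remove_actor_names list_to_modify actors_list (remove_actor_names list_to_modify actors_list)

-- ===== LEMMAS AND PROOFS =====
theorem mem_pvAStep (acc : List String) (p : String × String) (x : String) :
    x ∈ pvAStep acc p ↔ (x ∈ acc ∨ pvMatches x p.2 = true) := by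
  unfold pvAStep pvMatches
  split_ifs <;> simp [or_assoc]

theorem mem_foldl_inner (sub : List (String × String)) (acc : List String) (x : String) :
    x ∈ sub.foldl pvAStep acc
      ↔ (x ∈ acc ∨ (sub.any (fun p => pvMatches x p.2)) = true) := by
  induction sub generalizing acc with
  | nil => simp
  | cons p t ih =>
      simp [List.foldl_cons, ih, mem_pvAStep, or_assoc]

theorem mem_foldl_outer (al : List (List (String × String))) (acc : List String) (x : String) :
    x ∈ al.foldl (fun acc sublist => sublist.foldl pvAStep acc) acc
      ↔ (x ∈ acc ∨ (al.any (fun sub => sub.any (fun p => pvMatches x p.2))) = true) := by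
  induction al generalizing acc with
  | nil => simp
  | cons sub t ih =>
      simp [List.foldl_cons, ih, mem_foldl_inner, or_assoc]

-- ===== VERDICT (by name: the statement is the Claim_ definition above) =====
theorem remove_actor_names_spec : Claim_equal_remove_actor_names := by
  intro lm al _
  unfold Spec_remove_actor_names remove_actor_names remove_actor_names_alt
  refine List.filter_congr ?_
  intro s _
  rw [Bool.eq_iff_iff]
  simp [mem_foldl_outer]
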